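-- pv_equiv track=rewrite | github.com/weilueluo/Pictures-to-Picture | utilities.py | get_chunksize
-- ===== SOURCE A (Python) =====
-- def get_chunksize(files_count):
--     max_divider = 100  # 100%
--     files_per_divider = 0
--     while files_per_divider < 1 and max_divider >= 1:
--         files_per_divider = files_count // max_divider
--         max_divider -= 1
--     if files_per_divider < 1:
--         files_per_divider = 1
--
--     return files_per_divider
-- ===== SOURCE B (Python) =====
-- def get_chunksize(files_count):
--     if files_count >= 100:
--         return files_count // 100
--     return 1
-- ===== Notes on version B (the rewrite author's own statement) =====
-- stated objective: simpler
-- what changed: Replaces the descending while loop over dividers with its closed form: a single guard plus one floor division (quotient at the maximal divider if at least one, else one).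
import Mathlib
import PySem

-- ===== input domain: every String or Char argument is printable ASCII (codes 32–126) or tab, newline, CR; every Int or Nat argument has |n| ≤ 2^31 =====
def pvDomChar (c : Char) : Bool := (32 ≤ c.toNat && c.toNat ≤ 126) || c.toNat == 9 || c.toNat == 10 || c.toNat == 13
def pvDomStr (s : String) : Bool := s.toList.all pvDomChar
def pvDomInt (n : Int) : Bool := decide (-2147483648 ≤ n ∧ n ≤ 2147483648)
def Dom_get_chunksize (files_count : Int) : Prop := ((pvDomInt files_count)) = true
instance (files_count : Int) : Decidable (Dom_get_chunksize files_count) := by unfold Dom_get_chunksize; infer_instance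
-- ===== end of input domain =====

-- B replaces A's descending while loop over dividers 100..1 by its closed form (simpler).

-- ===== PORT A =====
-- the while loop: state (max_divider, files_per_divider); at most 100 iterations, fuel 100 is exact
def get_chunksize_loop (files_count : Int) (max_divider files_per_divider : Int) : Nat → Int
  | 0 => files_per_divider
  | fuel + 1 =>
    if files_per_divider < 1 ∧ max_divider ≥ 1 then
      get_chunksize_loop files_count (max_divider - 1)
        (PySem.Int.floordiv files_count max_divider) fuel
    else files_per_divider

def get_chunksize (files_count : Int) : Int :=
  let files_per_divider := get_chunksize_loop files_count 100 0 100
  if files_per_divider < 1 then 1 else files_per_divider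

-- ===== PORT B =====
def get_chunksize_alt (files_count : Int) : Int :=
  if files_count ≥ 100 then PySem.Int.floordiv files_count 100 else 1

-- ===== PRECONDITION & SPEC =====
def Spec_get_chunksize (files_count : Int) (out : Int) : Prop := out = get_chunksize_alt files_count
instance (files_count : Int) (out : Int) : Decidable (Spec_get_chunksize files_count out) := by unfold Spec_get_chunksize; infer_instance

-- ===== CLAIM (what is proved, stated in full; the proofs are below) =====
def Claim_equal_get_chunksize : Prop := ∀ (files_count : Int), Dom_get_chunksize files_count → Spec_get_chunksize files_count (get_chunksize files_count)

-- ===== LEMMAS AND PROOFS =====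

-- if the loop condition is already false, the loop returns its accumulator
theorem loop_done (fc md fpd : Int) (h : ¬ fpd < 1) :
    ∀ fuel, get_chunksize_loop fc md fpd fuel = fpd := by
  intro fuel
  cases fuel with
  | zero => rfl
  | succ n => simp [get_chunksize_loop, h]

-- with fc ≤ 0 every quotient stays below 1, so the loop's result stays below 1
theorem loop_nonpos (fc : Int) (hfc : fc ≤ 0) :
    ∀ (fuel : Nat) (md fpd : Int), fpd < 1 → get_chunksize_loop fc md fpd fuel < 1 := by
  intro fuel
  induction fuel with
  | zero => intro md fpd h; exact h
  | succ n ih =>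
    intro md fpd h
    by_cases hmd : md ≥ 1
    · simp only [get_chunksize_loop, h, hmd, and_self, if_true]
      apply ih
      rw [PySem.Int.floordiv_eq_ediv_of_pos (by omega)]
      have := Int.ediv_nonpos_of_nonpos_of_neg hfc (by omega : (1:Int) ≤ md)
      omega
    · simp [get_chunksize_loop, h, hmd]

-- with 1 ≤ fc < 100 the loop walks md down to fc, where fc // fc = 1 is accepted
theorem loop_small (fc : Int) (h1 : 1 ≤ fc) (h2 : fc < 100) :
    ∀ (fuel : Nat) (md fpd : Int), fpd < 1 → fc ≤ md → md - fc < fuel →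
      get_chunksize_loop fc md fpd fuel = 1 := by
  intro fuel
  induction fuel with
  | zero => intro md fpd _ hle hlt; omega
  | succ n ih =>
    intro md fpd h hle hlt
    have hmd : md ≥ 1 := by omega
    simp only [get_chunksize_loop, h, hmd, and_self, if_true]
    by_cases heq : md = fc
    · have hq : PySem.Int.floordiv fc md = 1 := by
        subst heq
        rw [PySem.Int.floordiv_eq_ediv_of_pos (by omega)]
        exact Int.ediv_self (by omega)
      rw [hq, loop_done fc (md - 1) 1 (by omega)]
    · have hq : PySem.Int.floordiv fc md = 0 := by
        rw [PySem.Int.floordiv_eq_ediv_of_pos (by omega)]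
        exact Int.ediv_eq_zero_of_lt (by omega) (by omega)
      rw [hq]
      exact ih (md - 1) 0 (by omega) (by omega) (by omega)

-- one unfolding step of the loop, for a literal fuel
theorem loop_step (fc md fpd : Int) (n : Nat) :
    get_chunksize_loop fc md fpd (n + 1) =
      if fpd < 1 ∧ md ≥ 1 then
        get_chunksize_loop fc (md - 1) (PySem.Int.floordiv fc md) n
      else fpd := rfl

-- ===== VERDICT (by name: the statement is the Claim_ definition above) =====
theorem get_chunksize_spec : Claim_equal_get_chunksize := by
  intro fc _
  have h100 : PySem.Int.floordiv fc 100 = fc / 100 :=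
    PySem.Int.floordiv_eq_ediv_of_pos (by omega)
  simp only [Spec_get_chunksize, get_chunksize, get_chunksize_alt, h100]
  by_cases hbig : fc ≥ 100
  · have hl : get_chunksize_loop fc 100 0 100 = fc / 100 := by
      rw [show (100 : Nat) = 99 + 1 from rfl, loop_step,
        if_pos ⟨by omega, by omega⟩, h100]
      exact loop_done fc 99 _ (by omega) 99
    rw [hl]
    split_ifs <;> omega
  · by_cases hpos : 1 ≤ fc
    · rw [loop_small fc hpos (by omega) 100 100 0 (by omega) (by omega) (by omega)]
      split_ifs <;> omega
    · have hl := loop_nonpos fc (by omega) 100 100 0 (by omega)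
      split_ifs <;> omega
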